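-- pv_equiv track=rewrite | github.com/Ciprian1922/Code_Works | GTC/Lecture_2_permutations/Lecture_3/R_permutation_NO_repetition.py | r_permutation_without_repetition_rank_k
-- ===== SOURCE A (Python) =====
-- def r_permutation_without_repetition_rank_k(A, r, k):
--     n = len(A)
--
--     # Compute the factorial
--     factorial = [1]
--     for i in range(1, n + 1):
--         factorial.append(factorial[-1] * i)
--
--     result = []
--
--     # Create a list of available elements
--     available_elements = A[:]
--
--     # Compute the r-permutation without repetition
--     for i in range(r, 0, -1):
--         idx = k // factorial[i - 1]
--         result.append(available_elements.pop(idx))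
--         k %= factorial[i - 1]
--
--     return result
-- ===== SOURCE B (Python) =====
-- def r_permutation_without_repetition_rank_k(A, r, k):
--     if r <= 0:
--         return []
--     # factoradic digits of k, least significant first, by successive small divisions
--     digits = []
--     for i in range(1, r):
--         k, d = divmod(k, i)
--         digits.append(d)
--     avail = list(A)
--     result = []
--     for idx in [k] + digits[::-1]:
--         result.append(avail.pop(idx))
--     return result
-- ===== Notes on version B (the rewrite author's own statement) =====
-- stated objective: simpler
-- what changed: B drops A's factorial table and running-k mutation: it extracts all factoradic digits of k bottom-up by successive divmod with 1..r-1 (no factorials are ever computed), then selects elements by those precomputed indices in a second pass.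
import Mathlib
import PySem

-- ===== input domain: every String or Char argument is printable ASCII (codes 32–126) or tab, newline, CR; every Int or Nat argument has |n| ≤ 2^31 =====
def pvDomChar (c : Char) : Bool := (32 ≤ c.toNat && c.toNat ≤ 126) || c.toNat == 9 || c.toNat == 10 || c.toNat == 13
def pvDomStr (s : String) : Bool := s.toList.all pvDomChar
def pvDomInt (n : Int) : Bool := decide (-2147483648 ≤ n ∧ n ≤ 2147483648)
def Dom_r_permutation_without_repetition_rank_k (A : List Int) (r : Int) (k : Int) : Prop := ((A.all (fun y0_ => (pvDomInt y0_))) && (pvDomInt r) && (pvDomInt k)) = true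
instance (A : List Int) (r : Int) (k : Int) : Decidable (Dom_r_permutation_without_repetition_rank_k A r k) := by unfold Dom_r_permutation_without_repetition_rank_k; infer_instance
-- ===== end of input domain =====

-- B replaces A's factorial table and running reduction of k by a bottom-up divmod chain that
-- extracts all factoradic digits first, then a selection pass over the precomputed indices
-- (objective: simpler — no factorials are ever computed).

-- ===== PORT A =====
-- loop body of 'for i in range(r, 0, -1)': idx = k // factorial[i-1]; result.append(available.pop(idx)); k %= factorial[i-1]
def pvStepA (factorial : List Int) (st : List Int × List Int × Int) (i : Int) : List Int × List Int × Int :=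
  let fim1 := (PySem.List.pyGet? factorial (i - 1)).getD 0  -- none = IndexError (outside Pre_)
  let idx := PySem.Int.floordiv st.2.2 fim1
  match PySem.List.pop? st.2.1 idx with
  | some (x, rest) => (st.1 ++ [x], rest, PySem.Int.mod st.2.2 fim1)
  | none => (st.1, st.2.1, PySem.Int.mod st.2.2 fim1)  -- Python raises IndexError here (outside Pre_)

def r_permutation_without_repetition_rank_k (A : List Int) (r : Int) (k : Int) : List Int :=
  let n : Int := (A.length : Int)
  -- factorial = [1]; for i in range(1, n+1): factorial.append(factorial[-1] * i)
  let factorial : List Int :=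
    (PySem.List.pyRange 1 (n + 1) 1).foldl
      (fun f i => f ++ [(PySem.List.pyGet? f (-1)).getD 0 * i]) [1]
  ((PySem.List.pyRange r 0 (-1)).foldl (pvStepA factorial) ([], A, k)).1

-- ===== PORT B =====
-- loop body of 'for i in range(1, r)': k, d = divmod(k, i); digits.append(d)
def pvStepDiv (p : Int × List Int) (i : Int) : Int × List Int :=
  (PySem.Int.floordiv p.1 i, p.2 ++ [PySem.Int.mod p.1 i])

-- loop body of 'for idx in [k] + digits[::-1]': result.append(avail.pop(idx))
def pvStepSel (st : List Int × List Int) (idx : Int) : List Int × List Int :=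
  match PySem.List.pop? st.2 idx with
  | some (x, rest) => (st.1 ++ [x], rest)
  | none => (st.1, st.2)  -- Python raises IndexError here (outside Pre_)

def r_permutation_without_repetition_rank_k_alt (A : List Int) (r : Int) (k : Int) : List Int :=
  if r ≤ 0 then []
  else
    let p := (PySem.List.pyRange 1 r 1).foldl pvStepDiv (k, [])
    ((p.1 :: p.2.reverse).foldl pvStepSel ([], A)).1

-- ===== PRECONDITION & SPEC =====
-- Exactly the inputs on which A returns normally: for r ≤ 0 A returns [] on every k; for 0 < r
-- A needs r ≤ len(A) and the leading index k // (r-1)! to be a valid Python pop index, i.e.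
-- -len(A)·(r-1)! ≤ k < len(A)·(r-1)!; everywhere else A raises IndexError.
def Pre_r_permutation_without_repetition_rank_k (A : List Int) (r : Int) (k : Int) : Prop :=
  0 < r →
    (r ≤ (A.length : Int) ∧
      -((A.length : Int) * (Nat.factorial (r - 1).toNat : Int)) ≤ k ∧
      k < (A.length : Int) * (Nat.factorial (r - 1).toNat : Int))
instance (A : List Int) (r : Int) (k : Int) : Decidable (Pre_r_permutation_without_repetition_rank_k A r k) := by unfold Pre_r_permutation_without_repetition_rank_k; infer_instance

def pvWitness_r_permutation_without_repetition_rank_k : List Int × Int × Int := ([3, 1, 2], 2, 2)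

def Spec_r_permutation_without_repetition_rank_k (A : List Int) (r : Int) (k : Int) (out : List Int) : Prop := out = r_permutation_without_repetition_rank_k_alt A r k
instance (A : List Int) (r : Int) (k : Int) (out : List Int) : Decidable (Spec_r_permutation_without_repetition_rank_k A r k out) := by unfold Spec_r_permutation_without_repetition_rank_k; infer_instance

-- ===== CLAIM (what is proved, stated in full; the proofs are below) =====
def Claim_equal_r_permutation_without_repetition_rank_k : Prop := ∀ (A : List Int) (r : Int) (k : Int), Dom_r_permutation_without_repetition_rank_k A r k → Pre_r_permutation_without_repetition_rank_k A r k → Spec_r_permutation_without_repetition_rank_k A r k (r_permutation_without_repetition_rank_k A r k)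

-- ===== LEMMAS AND PROOFS =====

def pvFact (m : Nat) : Int := (Nat.factorial m : Int)

theorem pvFact_pos (m : Nat) : 0 < pvFact m := by
  unfold pvFact; exact_mod_cast Nat.factorial_pos m

theorem pvFact_succ (m : Nat) : pvFact (m + 1) = pvFact m * ((m : Int) + 1) := by
  unfold pvFact; rw [Nat.factorial_succ]; push_cast; ring

-- the common model: at each step pop the (k // m!)-th remaining element and keep k % m!
def pvUnrank : Nat → List Int → Int → List Int
  | 0, _, _ => []
  | m + 1, avail, k =>
    match PySem.List.pop? avail (PySem.Int.floordiv k (pvFact m)) with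
    | some (x, rest) => x :: pvUnrank m rest (PySem.Int.mod k (pvFact m))
    | none => pvUnrank m avail (PySem.Int.mod k (pvFact m))

-- B's bottom-up digit list: digits[j] = (k // j!) % (j+1)
def pvBot (m : Nat) (k : Int) : List Int :=
  (List.range m).map (fun j => PySem.Int.mod (PySem.Int.floordiv k (pvFact j)) ((j : Int) + 1))

-- ---- integer arithmetic (floor division by positive divisors) ----

theorem pvL1 (k a b : Int) (ha : 0 < a) (_hb : 0 < b) : k / a / b = k / (a * b) :=
  Int.ediv_ediv_of_nonneg ha.le

theorem pvL2aux (a b q s : Int) (ha : 0 < a) (_hb : 0 < b) (hs0 : 0 ≤ s) (hs1 : s < a * b) :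
    (s + q * b * a) % (a * b) / a = (s + q * b * a) / a % b := by
  have h1 : (s + q * b * a) % (a * b) = s := by
    have he : s + q * b * a = s + (a * b) * q := by ring
    rw [he, Int.add_mul_emod_self_left, Int.emod_eq_of_lt hs0 hs1]
  have h2 : (s + q * b * a) / a = s / a + q * b := Int.add_mul_ediv_right _ _ ha.ne'
  have hlt : s / a < b := by rw [Int.ediv_lt_iff_lt_mul ha]; linarith
  have hge : 0 ≤ s / a := Int.ediv_nonneg hs0 ha.le
  have h3 : s / a + q * b = s / a + b * q := by ring
  rw [h1, h2, h3, Int.add_mul_emod_self_left, Int.emod_eq_of_lt hge hlt]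

theorem pvL2 (k a b : Int) (ha : 0 < a) (hb : 0 < b) : k % (a * b) / a = k / a % b := by
  have hab : 0 < a * b := mul_pos ha hb
  obtain ⟨q, s, hk, hs0, hs1⟩ : ∃ q s, k = s + q * b * a ∧ 0 ≤ s ∧ s < a * b :=
    ⟨k / (a * b), k % (a * b),
      by have := Int.mul_ediv_add_emod k (a * b); linarith,
      Int.emod_nonneg k hab.ne', Int.emod_lt_of_pos k hab⟩
  subst hk
  exact pvL2aux a b q s ha hb hs0 hs1

-- B's digit at level m equals A's: (k % (m+1)!) // m! = (k // m!) % (m+1)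
theorem pvTop (m : Nat) (k : Int) :
    PySem.Int.floordiv (PySem.Int.mod k (pvFact (m + 1))) (pvFact m)
      = PySem.Int.mod (PySem.Int.floordiv k (pvFact m)) ((m : Int) + 1) := by
  have hm : 0 < pvFact m := pvFact_pos m
  have hm1 : (0 : Int) < (m : Int) + 1 := by positivity
  rw [PySem.Int.floordiv_eq_ediv_of_pos hm, PySem.Int.mod_eq_emod_of_pos (pvFact_pos (m + 1)),
      PySem.Int.mod_eq_emod_of_pos hm1, PySem.Int.floordiv_eq_ediv_of_pos hm, pvFact_succ]
  exact pvL2 k (pvFact m) ((m : Int) + 1) hm hm1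

-- lower digits are unaffected by reducing k modulo a larger factorial
theorem pvBot_mod (m : Nat) (k : Int) :
    pvBot m (PySem.Int.mod k (pvFact (m + 1))) = pvBot m k := by
  unfold pvBot
  apply List.map_congr_left
  intro j hj
  have hjm : j < m := List.mem_range.mp hj
  have hj1 : (0 : Int) < (j : Int) + 1 := by positivity
  have hjf : 0 < pvFact j := pvFact_pos j
  obtain ⟨B, hB⟩ : Nat.factorial j ∣ Nat.factorial (m + 1) := Nat.factorial_dvd_factorial (by omega)
  have hBn : 0 < B := Nat.pos_of_ne_zero (by
    intro h0; rw [h0, Nat.mul_zero] at hB; exact (Nat.factorial_pos (m + 1)).ne' hB)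
  have hBi : pvFact (m + 1) = pvFact j * (B : Int) := by unfold pvFact; rw [hB]; push_cast; ring
  have hBpos : (0 : Int) < (B : Int) := by exact_mod_cast hBn
  have hj1B : ((j : Int) + 1) ∣ (B : Int) := by
    obtain ⟨C, hC⟩ : Nat.factorial (j + 1) ∣ Nat.factorial (m + 1) :=
      Nat.factorial_dvd_factorial (by omega)
    have hb2 : Nat.factorial j * B = Nat.factorial j * ((j + 1) * C) := by
      rw [← hB, hC, Nat.factorial_succ]; ring
    have hBC : B = (j + 1) * C := Nat.eq_of_mul_eq_mul_left (Nat.factorial_pos j) hb2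
    exact ⟨(C : Int), by rw [hBC]; push_cast; ring⟩
  rw [PySem.Int.mod_eq_emod_of_pos (pvFact_pos (m + 1)),
      PySem.Int.floordiv_eq_ediv_of_pos hjf, PySem.Int.floordiv_eq_ediv_of_pos hjf,
      PySem.Int.mod_eq_emod_of_pos hj1, PySem.Int.mod_eq_emod_of_pos hj1, hBi,
      pvL2 k (pvFact j) (B : Int) hjf hBpos, Int.emod_emod_of_dvd _ hj1B]

-- ---- port A equals the model ----

-- the factorial table built by A is [0!, 1!, …, n!]
theorem pvTableA (n : Nat) :
    (PySem.List.pyRange 1 ((n : Int) + 1) 1).foldl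
      (fun f i => f ++ [(PySem.List.pyGet? f (-1)).getD 0 * i]) [1]
      = (List.range (n + 1)).map pvFact := by
  induction n with
  | zero =>
    rw [PySem.List.pyRange_one_eq_nil (by norm_num)]
    simp [pvFact]
  | succ n ih =>
    have h1 : (((n + 1 : Nat) : Int) + 1) = ((n : Int) + 1) + 1 := by omega
    have hsplit : PySem.List.pyRange 1 (((n : Int) + 1) + 1) 1
        = PySem.List.pyRange 1 ((n : Int) + 1) 1 ++ [(n : Int) + 1] :=
      PySem.List.pyRange_one_succ_right (by omega)
    rw [h1, hsplit, List.foldl_append, ih]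
    have hne : (List.range (n + 1)).map pvFact = ((List.range n).map pvFact) ++ [pvFact n] := by
      rw [List.range_succ, List.map_append]; simp
    rw [hne]
    simp only [List.foldl_cons, List.foldl_nil, PySem.List.pyGet?_neg_one_append_singleton,
      Option.getD_some]
    rw [List.range_succ (n := n + 1), List.map_append, ← hne]
    simp [pvFact_succ]

-- table lookup: entry i-1 of the table is (i-1)!
theorem pvLookupA (n m : Nat) (h : m < n + 1) :
    (PySem.List.pyGet? ((List.range (n + 1)).map pvFact) (((m : Int) + 1) - 1)).getD 0
      = pvFact m := by
  have he : ((m : Int) + 1) - 1 = ((m : Nat) : Int) := by omega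
  rw [he, PySem.List.pyGet?_natCast]
  simp [List.getElem?_map, List.getElem?_range h]

-- A's main loop from any state equals the model (first component of the state)
theorem pvLoopA (n : Nat) (m : Nat) (hm : m ≤ n) :
    ∀ (res avail : List Int) (k : Int),
    ((PySem.List.pyRange (m : Int) 0 (-1)).foldl
        (pvStepA ((List.range (n + 1)).map pvFact)) (res, avail, k)).1
      = res ++ pvUnrank m avail k := by
  induction m with
  | zero =>
    intro res avail k
    rw [PySem.List.pyRange_neg_one_eq_nil (by norm_num)]
    simp [pvUnrank]
  | succ m ih =>
    intro res avail k
    have hcons : PySem.List.pyRange (((m + 1 : Nat) : Int)) 0 (-1)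
        = ((m + 1 : Nat) : Int) :: PySem.List.pyRange ((m : Int)) 0 (-1) := by
      have harg : ((m + 1 : Nat) : Int) - 1 = (m : Int) := by omega
      rw [PySem.List.pyRange_neg_one_cons (by exact_mod_cast Nat.succ_pos m), harg]
    rw [hcons, List.foldl_cons]
    have hstep : ∀ st : List Int × List Int × Int,
        pvStepA ((List.range (n + 1)).map pvFact) st ((m + 1 : Nat) : Int)
          = (match PySem.List.pop? st.2.1 (PySem.Int.floordiv st.2.2 (pvFact m)) with
            | some (x, rest) => (st.1 ++ [x], rest, PySem.Int.mod st.2.2 (pvFact m))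
            | none => (st.1, st.2.1, PySem.Int.mod st.2.2 (pvFact m))) := by
      intro st
      unfold pvStepA
      have hc : ((m + 1 : Nat) : Int) - 1 = ((m : Int) + 1) - 1 := by omega
      rw [hc, pvLookupA n m (by omega)]
    rw [hstep]
    cases hpop : PySem.List.pop? avail (PySem.Int.floordiv k (pvFact m)) with
    | some xr =>
      obtain ⟨x, rest⟩ := xr
      rw [ih (by omega) (res ++ [x]) rest (PySem.Int.mod k (pvFact m))]
      simp [pvUnrank, hpop]
    | none =>
      rw [ih (by omega) res avail (PySem.Int.mod k (pvFact m))]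
      simp [pvUnrank, hpop]

theorem pvPortA_eq (A : List Int) (r : Int) (k : Int)
    (hpre : Pre_r_permutation_without_repetition_rank_k A r k) :
    r_permutation_without_repetition_rank_k A r k = pvUnrank r.toNat A k := by
  unfold r_permutation_without_repetition_rank_k
  dsimp only
  rw [pvTableA A.length]
  by_cases hr : 0 < r
  · obtain ⟨hrn, -, -⟩ := hpre hr
    have hm : (r.toNat : Int) = r := Int.toNat_of_nonneg hr.le
    rw [← hm]
    exact pvLoopA A.length r.toNat (by omega) [] A k
  · rw [PySem.List.pyRange_neg_one_eq_nil (by omega)]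
    have h0 : r.toNat = 0 := by omega
    simp [h0, pvUnrank]

-- ---- port B equals the model ----

-- B's divmod chain: after dividing by 1, 2, …, m the quotient is k // m! and the
-- collected remainders are the bottom-up factoradic digits of k
theorem pvDigitsB (m : Nat) (k : Int) :
    (PySem.List.pyRange 1 ((m : Int) + 1) 1).foldl pvStepDiv (k, [])
      = (PySem.Int.floordiv k (pvFact m), pvBot m k) := by
  induction m with
  | zero =>
    rw [PySem.List.pyRange_one_eq_nil (by norm_num)]
    have h1 : PySem.Int.floordiv k (pvFact 0) = k := by
      rw [PySem.Int.floordiv_eq_ediv_of_pos (pvFact_pos 0)]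
      simp [pvFact]
    simp [h1, pvBot]
  | succ m ih =>
    have h1 : (((m + 1 : Nat) : Int) + 1) = ((m : Int) + 1) + 1 := by omega
    have hsplit : PySem.List.pyRange 1 (((m : Int) + 1) + 1) 1
        = PySem.List.pyRange 1 ((m : Int) + 1) 1 ++ [(m : Int) + 1] :=
      PySem.List.pyRange_one_succ_right (by omega)
    rw [h1, hsplit, List.foldl_append, ih]
    simp only [List.foldl_cons, List.foldl_nil]
    unfold pvStepDiv
    dsimp only
    rw [Prod.mk.injEq]
    refine ⟨?_, ?_⟩
    · -- quotient: (k // m!) // (m+1) = k // (m+1)!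
      rw [PySem.Int.floordiv_eq_ediv_of_pos (pvFact_pos m),
          PySem.Int.floordiv_eq_ediv_of_pos (by positivity : (0 : Int) < (m : Int) + 1),
          PySem.Int.floordiv_eq_ediv_of_pos (pvFact_pos (m + 1)), pvFact_succ]
      exact pvL1 k (pvFact m) ((m : Int) + 1) (pvFact_pos m) (by positivity)
    · -- digits: pvBot m k ++ [(k // m!) % (m+1)] = pvBot (m+1) k
      unfold pvBot
      rw [List.range_succ, List.map_append]
      simp

theorem pvSelB (m : Nat) :
    ∀ (res avail : List Int) (k : Int),
    ((PySem.Int.floordiv k (pvFact m) :: (pvBot m k).reverse).foldl pvStepSel (res, avail)).1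
      = res ++ pvUnrank (m + 1) avail k := by
  induction m with
  | zero =>
    intro res avail k
    cases hpop : PySem.List.pop? avail (PySem.Int.floordiv k (pvFact 0)) with
    | some xr =>
      obtain ⟨x, rest⟩ := xr
      simp [pvBot, pvStepSel, hpop, pvUnrank]
    | none => simp [pvBot, pvStepSel, hpop, pvUnrank]
  | succ m ih =>
    intro res avail k
    have hrev : (pvBot (m + 1) k).reverse
        = PySem.Int.mod (PySem.Int.floordiv k (pvFact m)) ((m : Int) + 1)
            :: (pvBot m k).reverse := by
      unfold pvBot
      rw [List.range_succ, List.map_append, List.reverse_append]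
      simp
    rw [hrev, List.foldl_cons]
    cases hpop : PySem.List.pop? avail (PySem.Int.floordiv k (pvFact (m + 1))) with
    | some xr =>
      obtain ⟨x, rest⟩ := xr
      have hs : pvStepSel (res, avail) (PySem.Int.floordiv k (pvFact (m + 1)))
          = (res ++ [x], rest) := by unfold pvStepSel; rw [hpop]
      rw [hs, ← pvTop m k, ← pvBot_mod m k, List.foldl_cons]
      have := ih (res ++ [x]) rest (PySem.Int.mod k (pvFact (m + 1)))
      rw [List.foldl_cons] at this
      rw [this]
      simp [pvUnrank, hpop]
    | none =>
      have hs : pvStepSel (res, avail) (PySem.Int.floordiv k (pvFact (m + 1)))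
          = (res, avail) := by unfold pvStepSel; rw [hpop]
      rw [hs, ← pvTop m k, ← pvBot_mod m k, List.foldl_cons]
      have := ih res avail (PySem.Int.mod k (pvFact (m + 1)))
      rw [List.foldl_cons] at this
      rw [this]
      simp [pvUnrank, hpop]

theorem pvPortB_eq (A : List Int) (r : Int) (k : Int) :
    r_permutation_without_repetition_rank_k_alt A r k = pvUnrank r.toNat A k := by
  unfold r_permutation_without_repetition_rank_k_alt
  by_cases hr : r ≤ 0
  · rw [if_pos hr]
    have h0 : r.toNat = 0 := by omega
    simp [h0, pvUnrank]
  · rw [if_neg hr]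
    dsimp only
    obtain ⟨m, hm⟩ : ∃ m, r.toNat = m + 1 := ⟨r.toNat - 1, by omega⟩
    have hr' : r = ((m : Int) + 1) := by omega
    have hmn : ((m : Int) + 1).toNat = m + 1 := by omega
    rw [hr', pvDigitsB m k, hmn]
    exact pvSelB m [] A k

-- ===== VERDICT (by name: the statement is the Claim_ definition above) =====
theorem r_permutation_without_repetition_rank_k_spec : Claim_equal_r_permutation_without_repetition_rank_k := by
  intro A r k _hdom hpre
  unfold Spec_r_permutation_without_repetition_rank_k
  rw [pvPortA_eq A r k hpre, pvPortB_eq A r k]
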